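-- pv_equiv track=rewrite | github.com/ShenChen1/our-factory-acm | 2022/test-0.py | solve
-- ===== SOURCE A (Python) =====
-- def solve(N):
--     num = list(N)
--
--     if '3' not in num:
--         num.sort()
--         return "".join(num)
--
--     index = num.index('3')
--     res = [n for n in num]
--     num1 = sorted(res[:index])
--     res[:index] = num1
--     left = index
--     right = len(num) - 1
--     for i in range(len(num) - 1, index - 1, -1):
--         if (num[i] == '2'):
--             res[left] = '2'
--             left += 1
--         else:
--             res[right] = num[i]
--             right -= 1
--     return ''.join(res)
-- ===== SOURCE B (Python) =====
-- def solve(N):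
--     s = list(N)
--     if '3' not in s:
--         return ''.join(sorted(s))
--     i = s.index('3')
--     tail = s[i:]
--     return ''.join(sorted(s[:i]) + ['2'] * tail.count('2') + [c for c in tail if c != '2'])
-- ===== Notes on version B (the rewrite author's own statement) =====
-- stated objective: simpler
-- what changed: A's in-place descending two-pointer partition loop over the suffix (writing '2's forward from left and the rest backward from right) is replaced by counting the '2's in the suffix and filtering out the non-'2' characters in one comprehension, concatenated after the sorted prefix.
import Mathlib
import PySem

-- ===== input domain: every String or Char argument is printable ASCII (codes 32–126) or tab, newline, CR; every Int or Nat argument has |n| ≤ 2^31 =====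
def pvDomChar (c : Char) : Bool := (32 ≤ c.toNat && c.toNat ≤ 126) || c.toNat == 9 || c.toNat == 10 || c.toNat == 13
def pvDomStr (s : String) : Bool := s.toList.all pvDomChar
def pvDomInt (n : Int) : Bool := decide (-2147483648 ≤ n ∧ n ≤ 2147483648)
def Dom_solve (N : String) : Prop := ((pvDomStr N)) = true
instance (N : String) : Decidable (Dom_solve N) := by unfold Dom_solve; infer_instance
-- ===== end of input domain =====

-- B replaces A's in-place two-pointer partition loop with a count of the '2's plus a
-- filter keeping the other suffix characters in order (objective: simpler; same cost).

-- ===== PORT A =====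
-- literal transliteration of A: list(N); sort if no '3'; else sort the prefix in place and
-- run the descending two-pointer loop writing into res.  The loop's writes res[left]/res[right]
-- are ported with pySetD and the reads num[i] with pyGetD: all these indices are provably in
-- range on every iteration (left ≥ index ≥ 0, left ≤ right < len), so Python never raises here.
def solve (N : String) : String :=
  let num := N.toList
  if '3' ∉ num then String.ofList (PySem.List.sorted num (fun c => c)) else
  let index : Nat := (PySem.List.index? num '3').getD 0   -- '3' ∈ num, so index? is some
  let res := num                                           -- res = [n for n in num]
  let num1 := PySem.List.sorted (res.take index) (fun c => c)   -- sorted(res[:index])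
  let res := num1 ++ res.drop index                        -- res[:index] = num1
  let fin := (PySem.List.pyRange ((num.length : Int) - 1) ((index : Int) - 1) (-1)).foldl
    (fun (st : List Char × Int × Int) i =>
      if PySem.List.pyGetD num i ' ' = '2' then
        (PySem.List.pySetD st.1 st.2.1 '2', st.2.1 + 1, st.2.2)
      else
        (PySem.List.pySetD st.1 st.2.2 (PySem.List.pyGetD num i ' '), st.2.1, st.2.2 - 1))
    (res, (index : Int), (num.length : Int) - 1)
  String.ofList fin.1

-- ===== PORT B =====
-- literal transliteration of Source B: the slices s[:i] / s[i:] have a nonnegative Nat bound,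
-- so they are take/drop (PySem.List.slice_to_natCast / slice_from_natCast).
def solve_alt (N : String) : String :=
  let s := N.toList
  if '3' ∉ s then String.ofList (PySem.List.sorted s (fun c => c)) else
  let i : Nat := (PySem.List.index? s '3').getD 0
  let tail := s.drop i
  String.ofList (PySem.List.sorted (s.take i) (fun c => c)
    ++ List.replicate (PySem.List.count tail '2') '2'
    ++ tail.filter (fun c => c ≠ '2'))

-- ===== PRECONDITION & SPEC =====
def Spec_solve (N : String) (out : String) : Prop := out = solve_alt N
instance (N : String) (out : String) : Decidable (Spec_solve N out) := by unfold Spec_solve; infer_instance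

-- ===== CLAIM (what is proved, stated in full; the proofs are below) =====
def Claim_equal_solve : Prop := ∀ (N : String), Dom_solve N → Spec_solve N (solve N)

-- ===== LEMMAS AND PROOFS =====

lemma set_take_succ {α : Type} (l : List α) (k : Nat) (v : α) (h : k < l.length) :
    (l.set k v).take (k+1) = l.take k ++ [v] := by
  rw [List.take_set, List.take_add_one, List.getElem?_eq_getElem h]
  show (List.take k l ++ [l[k]]).set k v = List.take k l ++ [v]
  rw [List.set_append_right _ _ (by simp [Nat.min_eq_left (Nat.le_of_lt h)])]
  simp [Nat.min_eq_left (Nat.le_of_lt h)]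

lemma set_drop_self {α : Type} (l : List α) (k : Nat) (v : α) (h : k < l.length) :
    (l.set k v).drop k = v :: l.drop (k+1) := by
  rw [List.drop_set, if_neg (by omega), Nat.sub_self, List.drop_eq_getElem_cons h]
  rfl

-- The two-pointer loop of A, started at left = ℓ and right = r and run over the descending
-- index range [lo, lo+n), fills res[ℓ..] with the '2's of the segment and res[..r] with its
-- other characters in original order, provided ℓ + n = r + 1 (the pointers meet exactly).
lemma solve_loop (num : List Char) :
    ∀ (n : Nat) (lo ℓ r : Int) (res : List Char),
    0 ≤ lo → 0 ≤ ℓ → lo.toNat + n ≤ num.length → ℓ + n = r + 1 → r < (res.length : Int) →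
    ((PySem.List.pyRange (lo + n - 1) (lo - 1) (-1)).foldl
      (fun (st : List Char × Int × Int) i =>
        if PySem.List.pyGetD num i ' ' = '2' then
          (PySem.List.pySetD st.1 st.2.1 '2', st.2.1 + 1, st.2.2)
        else
          (PySem.List.pySetD st.1 st.2.2 (PySem.List.pyGetD num i ' '), st.2.1, st.2.2 - 1))
      (res, ℓ, r)).1
    = res.take ℓ.toNat
      ++ List.replicate (((num.drop lo.toNat).take n).count '2') '2'
      ++ ((num.drop lo.toNat).take n).filter (fun c => c ≠ '2')
      ++ res.drop (r + 1).toNat := by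
  intro n
  induction n with
  | zero =>
    intro lo ℓ r res hlo hℓ hlen hsum hr
    rw [show lo + ((0:Nat):Int) - 1 = lo - 1 by push_cast; ring]
    rw [PySem.List.pyRange_neg_one_eq_nil le_rfl]
    have h1 : ℓ.toNat = (r+1).toNat := by omega
    simp [h1, List.take_append_drop]
  | succ n ih =>
    intro lo ℓ r res hlo hℓ hlen hsum hr
    have hik : (lo + (n:Int)).toNat = lo.toNat + n := by omega
    have hlt : lo.toNat + n < num.length := by omega
    have hget : PySem.List.pyGetD num (lo + (n:Int)) ' ' = num[lo.toNat + n] := by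
      rw [PySem.List.pyGetD_eq_getElem num ' ' (by omega) (by exact_mod_cast (by omega : lo + (n:Int) < (num.length : Int)))]
      simp [hik]
    have hcons : PySem.List.pyRange (lo + ((n:Nat)+1:Int) - 1) (lo - 1) (-1)
        = (lo + (n:Int)) :: PySem.List.pyRange (lo + (n:Int) - 1) (lo - 1) (-1) := by
      rw [show lo + ((n:Nat)+1:Int) - 1 = lo + (n:Int) by ring]
      exact PySem.List.pyRange_neg_one_cons (by omega)
    have hseg : (num.drop lo.toNat).take (n+1) = (num.drop lo.toNat).take n ++ [num[lo.toNat + n]] := by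
      rw [List.take_add_one, List.getElem?_drop, List.getElem?_eq_getElem hlt]
      rfl
    push_cast
    rw [hcons, List.foldl_cons]
    simp only [hget]
    by_cases h2 : num[lo.toNat + n] = '2'
    · rw [if_pos h2]
      rw [PySem.List.pySetD_of_nonneg _ _ hℓ]
      rw [ih lo (ℓ+1) r (res.set ℓ.toNat '2') hlo (by omega) (by omega) (by omega)
            (by simpa using hr)]
      have hℓlen : ℓ.toNat < res.length := by omega
      rw [show (ℓ+1).toNat = ℓ.toNat + 1 by omega]
      rw [set_take_succ _ _ _ hℓlen, List.drop_set_of_lt (by omega)]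
      rw [hseg]
      simp [h2, List.count_append, List.filter_append, List.replicate_succ]
    · rw [if_neg h2]
      have hr0 : (0:Int) ≤ r := by omega
      rw [PySem.List.pySetD_of_nonneg _ _ hr0]
      rw [ih lo ℓ (r-1) (res.set r.toNat num[lo.toNat + n]) hlo hℓ (by omega) (by omega)
            (by simp; omega)]
      have hrlen : r.toNat < res.length := by omega
      rw [List.take_set_of_le (by omega)]
      rw [show (r-1+1 : Int).toNat = r.toNat by omega]
      rw [set_drop_self _ _ _ hrlen]
      rw [show (r+1:Int).toNat = r.toNat + 1 by omega]
      rw [hseg]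
      simp [h2, List.count_append, List.filter_append]

theorem solve_spec : Claim_equal_solve := by
  unfold Claim_equal_solve
  intro N _
  unfold Spec_solve solve solve_alt
  by_cases h3 : '3' ∈ N.toList
  · have hs : ¬ ('3' ∉ N.toList) := not_not_intro h3
    rw [if_neg hs, if_neg hs]
    have hks : (PySem.List.index? N.toList '3').isSome := by
      rw [PySem.List.index?_isSome_iff]; exact h3
    obtain ⟨k, hk⟩ := Option.isSome_iff_exists.mp hks
    obtain ⟨hklen, -⟩ := PySem.List.getElem_of_index?_eq_some hk
    rw [hk]
    simp only [Option.getD_some]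
    set num := N.toList with hnum
    have hlen1 : (PySem.List.sorted (num.take k) (fun c => c)).length = k := by
      rw [PySem.List.length_sorted]; simp [List.length_take]; omega
    have hres : (PySem.List.sorted (num.take k) (fun c => c) ++ num.drop k).length = num.length := by
      simp [hlen1]; omega
    rw [show ((num.length:Int) - 1) = (k:Int) + ((num.length - k : Nat):Int) - 1 by
      rw [Nat.cast_sub hklen.le]; ring]
    rw [solve_loop num (num.length - k) (k:Int) (k:Int) ((k:Int) + ((num.length - k:Nat):Int) - 1)
      (PySem.List.sorted (num.take k) (fun c => c) ++ num.drop k)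
      (by positivity) (by positivity) (by simp; omega) (by ring) (by rw [hres]; omega)]
    have h1 : ((k:Int)).toNat = k := Int.toNat_natCast k
    have h2 : (((k:Int) + ((num.length - k:Nat):Int) - 1) + 1).toNat = num.length := by omega
    rw [h1, h2]
    rw [List.take_left' hlen1]
    have h4 : (num.drop k).take (num.length - k) = num.drop k :=
      List.take_of_length_le (by simp)
    have h5 : ((PySem.List.sorted (num.take k) (fun c => c)) ++ num.drop k).drop num.length = [] :=
      List.drop_eq_nil_of_le (by rw [hres])
    rw [h4, h5]
    simp [PySem.List.count_eq]
  · rw [if_pos h3, if_pos h3]
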